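-- pv_equiv track=rewrite | github.com/KarstenLansing/MP2 | player1.py | find_coin_clusters
-- ===== SOURCE A (Python) =====
-- def find_coin_clusters(coins, center, size=5):
--     x_center, y_center = center
--     cluster = []
--     for x in range(x_center - size // 2, x_center + size // 2 + 1):
--         for y in range(y_center - size // 2, y_center + size // 2 + 1):
--             if (x, y) in coins:
--                 cluster.append((x, y))
--     return cluster
-- ===== SOURCE B (Python) =====
-- def find_coin_clusters(coins, center, size=5):
--     x_center, y_center = center
--     half = size // 2
--     xlo, xhi = x_center - half, x_center + half
--     ylo, yhi = y_center - half, y_center + half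
--     hits = {c for c in coins if xlo <= c[0] <= xhi and ylo <= c[1] <= yhi}
--     return sorted(hits)
-- ===== Notes on version B (the rewrite author's own statement) =====
-- stated objective: faster
-- what changed: Instead of scanning every cell of the size x size window and testing membership in coins, B filters the coins themselves against the window bounds, dedupes them with a set, and sorts the survivors lexicographically.
import Mathlib
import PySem

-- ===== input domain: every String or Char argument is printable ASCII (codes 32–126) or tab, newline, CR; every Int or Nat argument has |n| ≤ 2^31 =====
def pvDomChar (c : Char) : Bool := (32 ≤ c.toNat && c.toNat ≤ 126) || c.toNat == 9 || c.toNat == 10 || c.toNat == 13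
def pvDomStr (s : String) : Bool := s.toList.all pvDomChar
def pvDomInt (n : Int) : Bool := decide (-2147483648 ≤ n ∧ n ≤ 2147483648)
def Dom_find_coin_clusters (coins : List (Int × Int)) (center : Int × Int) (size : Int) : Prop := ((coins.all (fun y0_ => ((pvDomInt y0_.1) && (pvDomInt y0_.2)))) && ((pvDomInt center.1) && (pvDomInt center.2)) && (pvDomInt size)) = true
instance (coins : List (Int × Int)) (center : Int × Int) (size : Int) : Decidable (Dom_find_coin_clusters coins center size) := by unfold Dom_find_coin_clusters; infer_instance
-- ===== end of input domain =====

-- B replaces A's size×size grid scan (membership test per cell) by filtering the coins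
-- against the window bounds, deduping with a set and sorting lexicographically.

-- ===== PORT A =====
def find_coin_clusters (coins : List (Int × Int)) (center : Int × Int) (size : Int) : List (Int × Int) :=
  let x_center := center.1
  let y_center := center.2
  (PySem.List.pyRange (x_center - PySem.Int.floordiv size 2) (x_center + PySem.Int.floordiv size 2 + 1)).foldl
    (fun cluster x =>
      (PySem.List.pyRange (y_center - PySem.Int.floordiv size 2) (y_center + PySem.Int.floordiv size 2 + 1)).foldl
        (fun cluster y => if (x, y) ∈ coins then cluster ++ [(x, y)] else cluster) cluster)
    []

-- ===== PORT B =====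
def find_coin_clusters_alt (coins : List (Int × Int)) (center : Int × Int) (size : Int) : List (Int × Int) :=
  let half := PySem.Int.floordiv size 2
  let xlo := center.1 - half
  let xhi := center.1 + half
  let ylo := center.2 - half
  let yhi := center.2 + half
  let hits := PySem.Set.ofList (coins.filter
    (fun c => decide (xlo ≤ c.1) && decide (c.1 ≤ xhi) && decide (ylo ≤ c.2) && decide (c.2 ≤ yhi)))
  PySem.List.sorted hits (fun c => toLex c)   -- sorted(hits): Python's lexicographic tuple order

-- ===== PRECONDITION & SPEC =====
def Spec_find_coin_clusters (coins : List (Int × Int)) (center : Int × Int) (size : Int) (out : List (Int × Int)) : Prop := out = find_coin_clusters_alt coins center size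
instance (coins : List (Int × Int)) (center : Int × Int) (size : Int) (out : List (Int × Int)) : Decidable (Spec_find_coin_clusters coins center size out) := by unfold Spec_find_coin_clusters; infer_instance

-- ===== CLAIM (what is proved, stated in full; the proofs are below) =====
def Claim_equal_find_coin_clusters : Prop := ∀ (coins : List (Int × Int)) (center : Int × Int) (size : Int), Dom_find_coin_clusters coins center size → Spec_find_coin_clusters coins center size (find_coin_clusters coins center size)

-- ===== LEMMAS AND PROOFS =====

-- range(a, b) is strictly increasing
lemma pyRange_one_pairwise_lt (a b : Int) : (PySem.List.pyRange a b).Pairwise (· < ·) := by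
  simp only [PySem.List.pyRange]
  split
  · exact List.Pairwise.nil
  · rw [List.pairwise_map]
    refine (List.pairwise_lt_range).imp ?_
    intro k k' hk
    omega

-- A's grid scan, written as a flatMap over the x-range
lemma find_coin_clusters_eq_flatMap (coins : List (Int × Int)) (center : Int × Int) (size : Int) :
    find_coin_clusters coins center size =
      (PySem.List.pyRange (center.1 - PySem.Int.floordiv size 2) (center.1 + PySem.Int.floordiv size 2 + 1)).flatMap
        (fun x =>
          ((PySem.List.pyRange (center.2 - PySem.Int.floordiv size 2) (center.2 + PySem.Int.floordiv size 2 + 1)).filter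
              (fun y => decide ((x, y) ∈ coins))).map (fun y => (x, y))) := by
  unfold find_coin_clusters
  have hin : ∀ (x : Int) (acc : List (Int × Int)),
      (PySem.List.pyRange (center.2 - PySem.Int.floordiv size 2) (center.2 + PySem.Int.floordiv size 2 + 1)).foldl
          (fun cluster y => if (x, y) ∈ coins then cluster ++ [(x, y)] else cluster) acc
        = acc ++ ((PySem.List.pyRange (center.2 - PySem.Int.floordiv size 2) (center.2 + PySem.Int.floordiv size 2 + 1)).filter
            (fun y => decide ((x, y) ∈ coins))).map (fun y => (x, y)) := by
    intro x acc
    simpa using PySem.List.foldl_append_if (fun y => decide ((x, y) ∈ coins)) (fun y => (x, y)) _ acc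
  simp only [hin]
  simpa using PySem.List.foldl_append_eq_flatMap
    (fun x =>
      ((PySem.List.pyRange (center.2 - PySem.Int.floordiv size 2) (center.2 + PySem.Int.floordiv size 2 + 1)).filter
          (fun y => decide ((x, y) ∈ coins))).map (fun y => (x, y)))
    _ []

theorem find_coin_clusters_eq (coins : List (Int × Int)) (center : Int × Int) (size : Int) :
    find_coin_clusters coins center size = find_coin_clusters_alt coins center size := by
  rw [find_coin_clusters_eq_flatMap]
  unfold find_coin_clusters_alt
  set h := PySem.Int.floordiv size 2 with hh
  set L := (PySem.List.pyRange (center.1 - h) (center.1 + h + 1)).flatMap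
      (fun x =>
        ((PySem.List.pyRange (center.2 - h) (center.2 + h + 1)).filter
            (fun y => decide ((x, y) ∈ coins))).map (fun y => (x, y))) with hL
  have hpair : L.Pairwise (fun a b => (toLex a : Lex (Int × Int)) < toLex b) := by
    rw [hL, List.pairwise_flatMap]
    constructor
    · intro x _
      rw [List.pairwise_map]
      refine ((pyRange_one_pairwise_lt _ _).sublist List.filter_sublist).imp ?_
      intro y y' hy
      rw [Prod.Lex.lt_iff]
      right; exact ⟨rfl, hy⟩
    · refine (pyRange_one_pairwise_lt _ _).imp ?_
      intro x x' hx
      intro p hp q hq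
      simp only [List.mem_map, List.mem_filter] at hp hq
      obtain ⟨y, _, rfl⟩ := hp
      obtain ⟨y', _, rfl⟩ := hq
      rw [Prod.Lex.lt_iff]
      left; exact hx
  have hnodup : L.Nodup := by
    refine hpair.imp ?_
    intro a b hab
    intro hEq
    rw [hEq] at hab
    exact lt_irrefl _ hab
  have hmem : ∀ p : Int × Int, p ∈ L ↔
      p ∈ PySem.Set.ofList (coins.filter
        (fun c => decide (center.1 - h ≤ c.1) && decide (c.1 ≤ center.1 + h) &&
                  decide (center.2 - h ≤ c.2) && decide (c.2 ≤ center.2 + h))) := by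
    intro p
    rw [PySem.Set.mem_ofList, List.mem_filter, hL, List.mem_flatMap]
    constructor
    · rintro ⟨x, hx, hpmem⟩
      simp only [List.mem_map, List.mem_filter] at hpmem
      obtain ⟨y, ⟨hy, hc⟩, rfl⟩ := hpmem
      rw [PySem.List.mem_pyRange_one] at hx hy
      simp only [decide_eq_true_eq] at hc
      refine ⟨hc, ?_⟩
      simp only [Bool.and_eq_true, decide_eq_true_eq]
      omega
    · rintro ⟨hc, hb⟩
      simp only [Bool.and_eq_true, decide_eq_true_eq] at hb
      refine ⟨p.1, ?_, ?_⟩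
      · rw [PySem.List.mem_pyRange_one]; omega
      · simp only [List.mem_map, List.mem_filter]
        refine ⟨p.2, ⟨?_, by simpa using hc⟩, rfl⟩
        rw [PySem.List.mem_pyRange_one]; omega
  have hperm : L.Perm (PySem.Set.ofList (coins.filter
      (fun c => decide (center.1 - h ≤ c.1) && decide (c.1 ≤ center.1 + h) &&
                decide (center.2 - h ≤ c.2) && decide (c.2 ≤ center.2 + h)))) :=
    (List.perm_ext_iff_of_nodup hnodup (PySem.Set.nodup_ofList _)).mpr hmem
  exact (PySem.List.sorted_eq_of_perm_of_pairwise_lt _ _ _ hperm hpair).symm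

-- ===== VERDICT (by name: the statement is the Claim_ definition above) =====
theorem find_coin_clusters_spec : Claim_equal_find_coin_clusters := by
  intro coins center size _
  unfold Spec_find_coin_clusters
  exact find_coin_clusters_eq coins center size
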